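-- pv_equiv track=rewrite | github.com/ZeinabRabea/SuffixAligner | git_hub_paper2.py | firstCol
-- ===== SOURCE A (Python) =====
-- def firstCol(tots):
-- #input repeat of element, output first colume of (BWM)
--     first={}
--     totc=0
--     for c in sorted(tots):
--         count=tots[c]
--         first[c]=(totc,totc+count)
--         totc+=count
--     return first
-- ===== SOURCE B (Python) =====
-- def firstCol(tots):
--     # rank-sum: each key's start is the total count of strictly smaller keys,
--     # computed independently per key (no running accumulator, no prefix table)
--     def start(k):
--         return sum(v for k2, v in tots.items() if k2 < k)
--     return {k: (start(k), start(k) + tots[k]) for k in sorted(tots)}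
-- ===== Notes on version B (the rewrite author's own statement) =====
-- stated objective: alternative
-- what changed: A threads a running total through one sorted pass to assign intervals; B computes each key's start independently as the rank-sum (total count of all strictly smaller keys) over the whole dict, with no accumulator or prefix table.
import Mathlib
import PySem

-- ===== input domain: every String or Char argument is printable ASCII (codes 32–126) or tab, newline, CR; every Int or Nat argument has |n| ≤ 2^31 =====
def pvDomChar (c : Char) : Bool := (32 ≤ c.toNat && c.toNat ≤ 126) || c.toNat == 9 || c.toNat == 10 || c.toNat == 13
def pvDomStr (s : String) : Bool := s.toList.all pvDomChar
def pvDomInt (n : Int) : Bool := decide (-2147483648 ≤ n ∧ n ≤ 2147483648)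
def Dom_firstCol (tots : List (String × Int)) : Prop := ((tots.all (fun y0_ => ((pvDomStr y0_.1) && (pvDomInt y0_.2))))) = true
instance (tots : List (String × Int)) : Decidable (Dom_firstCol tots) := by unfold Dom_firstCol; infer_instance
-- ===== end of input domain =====

-- B replaces A's running-total sorted pass by an independent per-key rank-sum
-- (start = total count of strictly smaller keys); objective: alternative algorithm.


-- ===== PORT A =====
-- for c in sorted(tots): count = tots[c]; first[c] = (totc, totc+count); totc += count
def firstCol (tots : List (String × Int)) : List (String × Int × Int) :=
  let d := PySem.Dict.ofList tots
  (((PySem.List.sorted d.keys (fun x => x) false).foldl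
      (fun (st : PySem.Dict String (Int × Int) × Int) c =>
        let count := d.getD c 0
        (st.1.insert c (st.2, st.2 + count), st.2 + count))
      (PySem.Dict.empty, 0)).1).items

-- ===== PORT B =====
-- start(k) = sum(v for k2, v in tots.items() if k2 < k);
-- {k: (start(k), start(k) + tots[k]) for k in sorted(tots)}
def firstCol_alt (tots : List (String × Int)) : List (String × Int × Int) :=
  let d := PySem.Dict.ofList tots
  let start : String → Int := fun k => ((d.items.filter (fun p => decide (p.1 < k))).map Prod.snd).sum
  ((PySem.List.sorted d.keys (fun x => x) false).foldl
      (fun (acc : PySem.Dict String (Int × Int)) k =>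
        acc.insert k (start k, start k + d.getD k 0))
      PySem.Dict.empty).items

-- ===== PRECONDITION & SPEC =====
def Spec_firstCol (tots : List (String × Int)) (out : List (String × Int × Int)) : Prop := out = firstCol_alt tots
instance (tots : List (String × Int)) (out : List (String × Int × Int)) : Decidable (Spec_firstCol tots out) := by unfold Spec_firstCol; infer_instance

-- ===== CLAIM =====
def Claim_equal_firstCol : Prop := ∀ (tots : List (String × Int)), Dom_firstCol tots → Spec_firstCol tots (firstCol tots)

-- ===== LEMMAS AND PROOFS =====

-- A's loop in normal form: intervals over keys ks starting at total t
def buildA (g : String → Int) : List String → Int → List (String × Int × Int)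
  | [], _ => []
  | c :: r, t => (c, t, t + g c) :: buildA g r (t + g c)

-- rank-sum over a key list
def rankSum (g : String → Int) (L : List String) (k : String) : Int :=
  ((L.filter (fun x => decide (x < k))).map g).sum

theorem foldA (g : String → Int) (ks : List String) :
    ∀ (fd : PySem.Dict String (Int × Int)) (t : Int),
    (∀ k ∈ ks, fd.contains k = false) → ks.Nodup →
    ((ks.foldl
        (fun (st : PySem.Dict String (Int × Int) × Int) c =>
          (st.1.insert c (st.2, st.2 + g c), st.2 + g c))
        (fd, t)).1).items = fd.items ++ buildA g ks t := by
  induction ks with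
  | nil => intro fd t _ _; simp [buildA]
  | cons c r ih =>
    intro fd t hfresh hnd
    have hc : fd.contains c = false := hfresh c (by simp)
    have hstep : ∀ k ∈ r, (fd.insert c (t, t + g c)).contains k = false := by
      intro k hk
      rw [PySem.Dict.contains_insert]
      have hne : k ≠ c := fun h => (List.nodup_cons.mp hnd).1 (h ▸ hk)
      simp [hne, hfresh k (List.mem_cons_of_mem _ hk)]
    have := ih (fd.insert c (t, t + g c)) (t + g c) hstep (List.nodup_cons.mp hnd).2
    simp only [List.foldl_cons, this, PySem.Dict.items_insert_of_not_contains fd _ hc,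
      buildA, List.append_assoc, List.cons_append, List.nil_append]

-- buildA over a strictly increasing key list is the rank-sum map
theorem buildA_eq_rankSum (g : String → Int) (ks : List String)
    (h : ks.Pairwise (· < ·)) : ∀ t : Int,
    buildA g ks t = ks.map (fun k => (k, t + rankSum g ks k, t + rankSum g ks k + g k)) := by
  induction ks with
  | nil => intro t; simp [buildA]
  | cons c r ih =>
    intro t
    have hlt : ∀ x ∈ r, c < x := fun x hx => (List.pairwise_cons.mp h).1 x hx
    have hhead : rankSum g (c :: r) c = 0 := by
      unfold rankSum
      have h0 : (c :: r).filter (fun x => decide (x < c)) = [] := by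
        rw [List.filter_eq_nil_iff]
        intro x hx
        rcases List.mem_cons.mp hx with rfl | hx'
        · simp
        · simp [not_lt_of_gt (hlt x hx')]
      rw [h0]
      simp
    have htail : ∀ k ∈ r, rankSum g (c :: r) k = g c + rankSum g r k := by
      intro k hk
      unfold rankSum
      rw [List.filter_cons_of_pos (by simp [hlt k hk])]
      simp
    simp only [buildA, ih (List.pairwise_cons.mp h).2 (t + g c), List.map_cons, hhead]
    refine congrArg₂ _ (by simp) ?_
    exact (List.map_congr_left (fun k hk => by rw [htail k hk]; ring_nf)).symm

theorem pairwise_lt_of_sorted_nodup (L : List String)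
    (hnd : (PySem.List.sorted L (fun x => x) false).Nodup) :
    (PySem.List.sorted L (fun x => x) false).Pairwise (· < ·) := by
  have hle := PySem.List.sorted_pairwise L (fun x => x)
  exact (hle.and hnd).imp (fun hp => lt_of_le_of_ne hp.1 hp.2)

-- B's items-based start equals the rank-sum over any permutation of the keys
theorem start_eq_rankSum (d : PySem.Dict String Int) (hndk : d.keys.Nodup) (ks : List String)
    (hperm : ks.Perm d.keys) (k : String) :
    ((d.items.filter (fun p => decide (p.1 < k))).map Prod.snd).sum
      = rankSum (fun x => d.getD x 0) ks k := by
  have h1 : (d.items.filter (fun p => decide (p.1 < k))).map Prod.snd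
      = (d.items.filter (fun p => decide (p.1 < k))).map (fun p => d.getD p.1 0) := by
    refine List.map_congr_left (fun p hp => ?_)
    obtain ⟨a, b⟩ := p
    exact (PySem.Dict.getD_of_mem_items d (List.mem_of_mem_filter hp) hndk 0).symm
  have h2 : (d.items.filter (fun p => decide (p.1 < k))).map (fun p => d.getD p.1 0)
      = ((d.items.map Prod.fst).filter (fun x => decide (x < k))).map (fun x => d.getD x 0) := by
    rw [List.filter_map, List.map_map]; rfl
  have h3 : d.keys = d.items.map Prod.fst := rfl
  have hps : (ks.filter (fun x => decide (x < k))).Perm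
      ((d.items.map Prod.fst).filter (fun x => decide (x < k))) := by
    rw [← h3]; exact hperm.filter _
  rw [h1, h2, rankSum, (hps.map _).sum_eq]

-- ===== VERDICT =====
theorem firstCol_spec : Claim_equal_firstCol := by
  intro tots _
  unfold Spec_firstCol firstCol firstCol_alt
  set d := PySem.Dict.ofList tots with hd
  set g : String → Int := fun x => d.getD x 0 with hg
  set ks := PySem.List.sorted d.keys (fun x => x) false with hks
  have hperm : ks.Perm d.keys := PySem.List.sorted_perm _ _ false
  have hnd : ks.Nodup := hperm.symm.nodup (PySem.Dict.nodup_keys_ofList tots)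
  have hpw : ks.Pairwise (· < ·) := pairwise_lt_of_sorted_nodup d.keys (hks ▸ hnd)
  -- A side
  have hA := foldA g ks PySem.Dict.empty 0 (fun k _ => PySem.Dict.contains_empty k) hnd
  simp only [show (PySem.Dict.empty : PySem.Dict String (Int × Int)).items = [] from rfl,
    List.nil_append] at hA
  -- B side: fresh distinct keys appended
  have hB := PySem.Dict.items_foldl_insert_fresh (ν := Int × Int) ks (fun k => k)
    (fun k => (((d.items.filter (fun p => decide (p.1 < k))).map Prod.snd).sum,
      ((d.items.filter (fun p => decide (p.1 < k))).map Prod.snd).sum + d.getD k 0))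
    PySem.Dict.empty (fun a _ => PySem.Dict.contains_empty a) (by simpa using hnd)
  simp only [show (PySem.Dict.empty : PySem.Dict String (Int × Int)).items = [] from rfl,
    List.nil_append] at hB
  rw [hA, hB, buildA_eq_rankSum g ks hpw 0]
  refine List.map_congr_left (fun k _ => ?_)
  rw [start_eq_rankSum d (PySem.Dict.nodup_keys_ofList tots) ks hperm k]
  simp only [← hg, zero_add]
  rfl
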